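-- pv_equiv track=rewrite | github.com/harryn0502/infinite-loop | scripts/ingestion.py | build_root_id_map
-- ===== SOURCE A (Python) =====
-- from typing import Any, Dict, List
--
-- def build_root_id_map(runs: List[Dict[str, Any]]) -> Dict[str, str]:
--     """Build a mapping from each run's id to the id of its root parent run.
--
--     LangSmith traces form a tree where each run references its parent via
--     the `parent_run_id` field. A run whose `parent_run_id` is None is a root.
--     This helper walks the parent chain to find the root id for each run.
--
--     Parameters
--     ----------
--     runs: List[Dict]
--         A list of run dicts loaded from JSON.
--
--     Returns
--     -------
--     Dict[str, str]
--         A mapping from run id to its root id. Runs without an id will be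
--         ignored in the mapping.
--     """
--     # Build a lookup by run id for quick parent traversal
--     by_id: Dict[str, Dict[str, Any]] = {r.get('id'): r for r in runs if r.get('id')}
--     root_cache: Dict[str, str] = {}
--
--     def find_root(rid: str) -> str:
--         # Return cached if computed
--         if rid in root_cache:
--             return root_cache[rid]
--         # If run not found, treat id as its own root
--         run = by_id.get(rid)
--         if not run:
--             root_cache[rid] = rid
--             return rid
--         parent_id = run.get('parent_run_id')
--         # If no parent, this run is the root
--         if not parent_id:
--             root_cache[rid] = rid
--             return rid
--         # Otherwise, recursively find parent root
--         root = find_root(parent_id)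
--         root_cache[rid] = root
--         return root
--
--     # Compute root id for all runs with ids
--     for rid in by_id:
--         find_root(rid)
--     return root_cache
-- ===== SOURCE B (Python) =====
-- def _parent_of(by_id, cur):
--     run = by_id.get(cur)
--     if not run:
--         return None
--     pid = run.get('parent_run_id')
--     return pid if pid else None
--
--
-- def build_root_id_map(runs):
--     by_id = {r.get('id'): r for r in runs if r.get('id')}
--     root_cache = {}
--     for rid in by_id:
--         path = []
--         cur = rid
--         while cur not in root_cache:
--             pid = _parent_of(by_id, cur)
--             if pid is None:
--                 root_cache[cur] = cur
--                 break
--             path.append(cur)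
--             cur = pid
--         root = root_cache[cur]
--         for node in reversed(path):
--             root_cache[node] = root
--     return root_cache
-- ===== Notes on version B (the rewrite author's own statement) =====
-- stated objective: alternative
-- what changed: Replaces the memoized recursive find_root with an iterative parent-chain walk that records the visited path in a list and then assigns the found root back along the path, keeping only the root_cache dict.
import Mathlib
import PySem

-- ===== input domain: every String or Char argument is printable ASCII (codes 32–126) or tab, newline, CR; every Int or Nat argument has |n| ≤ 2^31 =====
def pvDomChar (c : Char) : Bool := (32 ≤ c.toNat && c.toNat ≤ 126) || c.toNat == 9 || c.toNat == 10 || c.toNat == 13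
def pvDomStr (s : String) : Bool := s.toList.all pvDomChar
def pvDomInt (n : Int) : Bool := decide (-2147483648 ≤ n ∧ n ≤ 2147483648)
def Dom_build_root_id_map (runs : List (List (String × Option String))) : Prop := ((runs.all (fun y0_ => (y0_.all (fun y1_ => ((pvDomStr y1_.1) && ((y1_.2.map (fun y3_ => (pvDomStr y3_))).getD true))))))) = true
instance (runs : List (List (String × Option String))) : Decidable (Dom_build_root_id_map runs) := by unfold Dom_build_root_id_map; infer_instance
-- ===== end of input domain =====

-- B replaces A's memoized recursive find_root with an iterative parent-chain walk that
-- collects the visited path and assigns the discovered root back along it (objective: alternative).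


-- Shared helper (both Pythons build by_id with the identical dict comprehension):
-- by_id = {r.get('id'): r for r in runs if r.get('id')}  (truthy id = present, non-None, non-empty)
def mkById (runs : List (List (String × Option String))) :
    PySem.Dict String (List (String × Option String)) :=
  runs.foldl (fun d r =>
    match (PySem.Dict.mk r).get? "id" with
    | some (some s) => if s = "" then d else d.insert s r
    | _ => d) PySem.Dict.empty

-- ===== PORT A =====
-- find_root(rid) with root_cache threaded explicitly; fuel makes the Python recursion total
-- (under Pre_ the fuel is never exhausted).
def findRootA (byId : PySem.Dict String (List (String × Option String))) :
    Nat → PySem.Dict String String → String → String × PySem.Dict String String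
  | 0, cache, rid => (rid, cache)
  | fuel+1, cache, rid =>
    match cache.get? rid with
    | some r => (r, cache)
    | none =>
      match byId.get? rid with
      | none => (rid, cache.insert rid rid)       -- run not found: own root
      | some run =>
        if run = [] then (rid, cache.insert rid rid)   -- 'if not run'
        else
          match (PySem.Dict.mk run).get? "parent_run_id" with
          | some (some p) =>
            if p = "" then (rid, cache.insert rid rid)  -- 'if not parent_id'
            else
              let res := findRootA byId fuel cache p
              (res.1, res.2.insert rid res.1)
          | _ => (rid, cache.insert rid rid)

def build_root_id_map (runs : List (List (String × Option String))) : List (String × String) :=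
  let byId := mkById runs
  let fuel := byId.keys.length + 1
  ((byId.keys).foldl (fun cache rid => (findRootA byId fuel cache rid).2) PySem.Dict.empty).items

-- ===== PORT B =====
-- _parent_of(by_id, cur): the parent id, or None when cur is its own root
def parentOf (byId : PySem.Dict String (List (String × Option String))) (cur : String) :
    Option String :=
  match byId.get? cur with
  | none => none
  | some run =>
    if run = [] then none
    else
      match (PySem.Dict.mk run).get? "parent_run_id" with
      | some (some p) => if p = "" then none else some p
      | _ => none

-- iterative while-loop walk; path built by cons = Python append + reversed iteration;
-- fuel makes the while loop total (never exhausted under Pre_).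
def walkB (byId : PySem.Dict String (List (String × Option String))) :
    Nat → PySem.Dict String String → String → List String → PySem.Dict String String
  | 0, cache, _, _ => cache
  | fuel+1, cache, cur, path =>
    match cache.get? cur with
    | some root => path.foldl (fun d n => d.insert n root) cache
    | none =>
      match parentOf byId cur with
      | none => path.foldl (fun d n => d.insert n cur) (cache.insert cur cur)
      | some p => walkB byId fuel cache p (cur :: path)

def build_root_id_map_alt (runs : List (List (String × Option String))) : List (String × String) :=
  let byId := mkById runs
  let fuel := byId.keys.length + 1
  ((byId.keys).foldl (fun cache rid => walkB byId fuel cache rid []) PySem.Dict.empty).items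

-- ===== PRECONDITION & SPEC =====
-- chainOk f rid: following parent pointers from rid reaches a root within f steps
def chainOk (byId : PySem.Dict String (List (String × Option String))) :
    Nat → String → Bool
  | 0, _ => false
  | f+1, rid =>
    match parentOf byId rid with
    | none => true
    | some p => chainOk byId f p

-- Pre_ excludes exactly the inputs whose parent pointers form a reachable cycle:
-- there Python A raises RecursionError (it returns on every acyclic input, since an
-- acyclic chain visits each id at most once and so ends within |by_id| + 1 steps).
def Pre_build_root_id_map (runs : List (List (String × Option String))) : Prop :=
  ((mkById runs).keys.all (fun rid => chainOk (mkById runs) ((mkById runs).keys.length + 1) rid)) = true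

instance (runs : List (List (String × Option String))) : Decidable (Pre_build_root_id_map runs) := by
  unfold Pre_build_root_id_map; infer_instance

def pvWitness_build_root_id_map : (List (List (String × Option String))) :=
  [[("id", some "a"), ("parent_run_id", none)],
   [("id", some "b"), ("parent_run_id", some "a")],
   [("id", some "c"), ("parent_run_id", some "z")]]

def Spec_build_root_id_map (runs : List (List (String × Option String))) (out : List (String × String)) : Prop := out = build_root_id_map_alt runs
instance (runs : List (List (String × Option String))) (out : List (String × String)) : Decidable (Spec_build_root_id_map runs out) := by unfold Spec_build_root_id_map; infer_instance

-- ===== CLAIM (what is proved, stated in full; the proofs are below) =====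
def Claim_equal_build_root_id_map : Prop := ∀ (runs : List (List (String × Option String))), Dom_build_root_id_map runs → Pre_build_root_id_map runs → Spec_build_root_id_map runs (build_root_id_map runs)

-- ===== LEMMAS AND PROOFS =====

-- Core invariant: when the chain from `cur` resolves within the fuel, the iterative walk
-- equals A's recursive resolution followed by assigning the root along the collected path.
theorem walkB_eq_findRootA (byId : PySem.Dict String (List (String × Option String))) :
    ∀ (f : Nat) (cur : String) (cache : PySem.Dict String String) (path : List String),
      chainOk byId f cur = true →
      walkB byId f cache cur path =
        path.foldl (fun d n => d.insert n (findRootA byId f cache cur).1)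
          (findRootA byId f cache cur).2 := by
  intro f
  induction f with
  | zero => intro cur cache path h; simp [chainOk] at h
  | succ f ih =>
    intro cur cache path h
    simp only [walkB, findRootA]
    cases hc : cache.get? cur with
    | some r => rfl
    | none =>
      have hpar : (match parentOf byId cur with
          | none => true
          | some p => chainOk byId f p) = true := h
      cases hp : parentOf byId cur with
      | none =>
        -- terminal: unfold A's inline branching to match parentOf = none
        unfold parentOf at hp
        cases hby : byId.get? cur with
        | none => simp
        | some run =>
          simp only [hby] at hp
          by_cases hre : run = []
          · simp [hre]
          · simp only [if_neg hre] at hp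
            cases hg : (PySem.Dict.mk run).get? "parent_run_id" with
            | none => simp [hre, hg]
            | some v =>
              cases v with
              | none => simp [hre, hg]
              | some p =>
                simp only [hg] at hp
                by_cases hpe : p = ""
                · simp [hre, hg, hpe]
                · simp [hpe] at hp
      | some p =>
        rw [hp] at hpar
        -- A's inline branching reaches the recursive call
        unfold parentOf at hp
        cases hby : byId.get? cur with
        | none => simp [hby] at hp
        | some run =>
          simp only [hby] at hp
          by_cases hre : run = []
          · simp [hre] at hp
          · simp only [if_neg hre] at hp
            cases hg : (PySem.Dict.mk run).get? "parent_run_id" with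
            | none => simp [hg] at hp
            | some v =>
              cases v with
              | none => simp [hg] at hp
              | some q =>
                simp only [hg] at hp
                by_cases hpe : q = ""
                · simp [hpe] at hp
                · simp only [if_neg hpe, Option.some.injEq] at hp
                  subst hp
                  dsimp only
                  simp only [if_neg hre]
                  rw [ih _ cache (cur :: path) hpar]
                  simp [hg, hpe, List.foldl]

-- ===== VERDICT (by name: the statement is the Claim_ definition above) =====
theorem build_root_id_map_spec : Claim_equal_build_root_id_map := by
  intro runs _ hpre
  unfold Spec_build_root_id_map build_root_id_map build_root_id_map_alt
  simp only [Pre_build_root_id_map, List.all_eq_true] at hpre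
  -- hpre now: chainOk for every key
  dsimp only
  congr 1
  apply PySem.List.foldl_congr_mem
  intro cache rid hmem
  have h := hpre rid hmem
  rw [walkB_eq_findRootA (mkById runs) _ rid cache [] h]
  simp [List.foldl]
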